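-- pv_equiv track=rewrite | github.com/Wazzabeee/copy-spotter | scripts/html_utils.py | get_ordered_blocks_positions
-- ===== SOURCE A (Python) =====
-- from operator import itemgetter
-- from typing import List, Tuple
--
-- def get_ordered_blocks_positions(string: str, matching_blocks: list, string_blocks: list) -> list:
--     """Return ordered list of all positions of matching blocks in string"""
--
--     all_blocks_positions: List[Tuple[int, int]] = []
--
--     for block_ind, _ in enumerate(matching_blocks):
--         # Find all positions of substring in string
--         block_positions = [char for char in range(len(string)) if string.startswith(string_blocks[block_ind], char)]
--
--         for position in block_positions:
--             # We check if there is another block starting at the same position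
--             var = [pos_tuple for pos_tuple in all_blocks_positions if pos_tuple[0] == position]
--             if var:  # If there is one such block
--                 size = len(string_blocks[var[0][1]])  # get size of block in var
--                 if size < len(string_blocks[block_ind]):
--                     # Remove old position block which is smaller than curr block
--                     all_blocks_positions.pop(all_blocks_positions.index(var[0]))
--
--                     # Add new block to list
--                     all_blocks_positions.append((position, block_ind))
--             else:
--                 all_blocks_positions.append((position, block_ind))
--
--     return sorted(all_blocks_positions, key=itemgetter(0))
-- ===== SOURCE B (Python) =====
-- def get_ordered_blocks_positions(string: str, matching_blocks: list, string_blocks: list) -> list: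
--     """Return ordered list of all positions of matching blocks in string"""
--     result = []
--     for position in range(len(string)):
--         best = None
--         for i in range(len(matching_blocks)):
--             block = string_blocks[i]
--             if string.startswith(block, position) and (best is None or len(string_blocks[best]) < len(block)):
--                 best = i
--         if best is not None:
--             result.append((position, best))
--     return result
-- ===== Notes on version B (the rewrite author's own statement) =====
-- stated objective: simpler
-- what changed: Replaces the block-major pipeline (collect positions per block, scan the accumulator for a conflicting block at the same position, pop/re-append, final sort) by a single position-major pass that selects the longest matching block per position with a strict-> max, emitting results already in ascending position order with no sort and no conflict resolution.
import Mathlib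
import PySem

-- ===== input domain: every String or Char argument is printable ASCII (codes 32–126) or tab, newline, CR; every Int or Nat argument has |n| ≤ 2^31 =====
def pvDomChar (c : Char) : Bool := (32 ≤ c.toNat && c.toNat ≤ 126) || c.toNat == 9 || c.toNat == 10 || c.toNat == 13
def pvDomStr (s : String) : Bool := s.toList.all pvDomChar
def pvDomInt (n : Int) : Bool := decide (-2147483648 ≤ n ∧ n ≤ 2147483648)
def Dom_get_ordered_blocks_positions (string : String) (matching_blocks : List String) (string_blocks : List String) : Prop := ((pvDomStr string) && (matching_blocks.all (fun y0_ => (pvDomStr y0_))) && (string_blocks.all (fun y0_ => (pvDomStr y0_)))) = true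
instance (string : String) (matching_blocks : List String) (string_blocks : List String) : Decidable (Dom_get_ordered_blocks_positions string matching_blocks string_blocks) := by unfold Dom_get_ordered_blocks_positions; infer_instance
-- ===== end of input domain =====

-- B replaces A's block-major collect/conflict-scan/pop/sort pipeline by one position-major
-- pass selecting the longest matching block per position (objective: simpler; same result).

-- ===== PORT A =====
-- inner-loop body of A ('for position in block_positions: …'), kept as a named helper:
-- var = [t for t in abp if t[0] == position]; if var: compare block sizes and maybe
-- pop at list.index then append, else append.
def pvAInner (string_blocks : List String) (blockInd : Int) (abp : List (Int × Int)) (position : Int) : List (Int × Int) :=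
  match abp.filter (fun t => t.1 == position) with
  | [] => abp ++ [(position, blockInd)]
  | v :: _ =>
      if PySem.Str.len (PySem.List.pyGetD string_blocks v.2 "") < PySem.Str.len (PySem.List.pyGetD string_blocks blockInd "") then
        (match PySem.List.index? abp v with
         | some j =>
             match PySem.List.pop? abp (j : Int) with
             | some r => r.2
             | none => abp
         | none => abp) ++ [(position, blockInd)]
      else abp

-- 'string.startswith(string_blocks[block_ind], char)' is ported as startswith on 'drop char',
-- exact for 0 ≤ char ≤ len(string) (char ranges over range(len(string))).
def get_ordered_blocks_positions (string : String) (matching_blocks : List String) (string_blocks : List String) : List (Int × Int) :=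
  let all := (PySem.List.enumerate matching_blocks).foldl
    (fun abp bi =>
      let blockPositions := (PySem.List.pyRange 0 (PySem.Str.len string)).filter
        (fun char => PySem.Chars.startswith (string.toList.drop char.toNat) (PySem.List.pyGetD string_blocks bi.1 "").toList)
      blockPositions.foldl (pvAInner string_blocks bi.1) abp)
    []
  PySem.List.sorted all (fun t => t.1)

-- ===== PORT B =====
def get_ordered_blocks_positions_alt (string : String) (matching_blocks : List String) (string_blocks : List String) : List (Int × Int) :=
  (PySem.List.pyRange 0 (PySem.Str.len string)).foldl
    (fun result position =>
      let best := (PySem.List.pyRange 0 (PySem.List.len matching_blocks)).foldl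
        (fun best i =>
          if PySem.Chars.startswith (string.toList.drop position.toNat) (PySem.List.pyGetD string_blocks i "").toList
             && (match best with
                 | none => true
                 | some b => decide (PySem.Str.len (PySem.List.pyGetD string_blocks b "") < PySem.Str.len (PySem.List.pyGetD string_blocks i "")))
          then some i else best)
        (none : Option Int)
      match best with
      | some b => result ++ [(position, b)]
      | none => result)
    []

-- ===== PRECONDITION & SPEC =====
-- Pre_ excludes exactly the inputs on which the Python A raises IndexError: when the string is
-- nonempty, string_blocks[block_ind] is read for every block_ind < len(matching_blocks).
-- Python B raises IndexError on exactly the same inputs.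
def Pre_get_ordered_blocks_positions (string : String) (matching_blocks : List String) (string_blocks : List String) : Prop :=
  string.toList = [] ∨ matching_blocks.length ≤ string_blocks.length
instance (string : String) (matching_blocks : List String) (string_blocks : List String) : Decidable (Pre_get_ordered_blocks_positions string matching_blocks string_blocks) := by unfold Pre_get_ordered_blocks_positions; infer_instance
def pvWitness_get_ordered_blocks_positions : String × List String × List String := ("abcab", ["x", "y"], ["ab", "b"])

def Spec_get_ordered_blocks_positions (string : String) (matching_blocks : List String) (string_blocks : List String) (out : List (Int × Int)) : Prop := out = get_ordered_blocks_positions_alt string matching_blocks string_blocks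
instance (string : String) (matching_blocks : List String) (string_blocks : List String) (out : List (Int × Int)) : Decidable (Spec_get_ordered_blocks_positions string matching_blocks string_blocks out) := by unfold Spec_get_ordered_blocks_positions; infer_instance

-- ===== CLAIM (what is proved, stated in full; the proofs are below) =====
def Claim_equal_get_ordered_blocks_positions : Prop := ∀ (string : String) (matching_blocks : List String) (string_blocks : List String), Dom_get_ordered_blocks_positions string matching_blocks string_blocks → Pre_get_ordered_blocks_positions string matching_blocks string_blocks → Spec_get_ordered_blocks_positions string matching_blocks string_blocks (get_ordered_blocks_positions string matching_blocks string_blocks)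

-- ===== LEMMAS AND PROOFS =====

-- the single update step of B's inner scan ('best' update), shared model of both programs
def pvStep (s : List Char) (sb : List String) (p : Nat) (best : Option Int) (i : Int) : Option Int :=
  if PySem.Chars.startswith (s.drop p) (PySem.List.pyGetD sb i "").toList
     && (match best with
         | none => true
         | some b => decide (PySem.Str.len (PySem.List.pyGetD sb b "") < PySem.Str.len (PySem.List.pyGetD sb i "")))
  then some i else best

-- best block index among the first k blocks at position p
def pvBest (s : List Char) (sb : List String) (k : Nat) (p : Nat) : Option Int :=
  (List.range k).foldl (fun best (i : Nat) => pvStep s sb p best (i : Int)) none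

def pvMixF (s : List Char) (sb : List String) (k q : Nat) (p : Nat) : Option (Int × Int) :=
  (if p < q then pvBest s sb (k+1) p else pvBest s sb k p).map (fun b => ((p : Int), b))

-- model of A's accumulator: blocks < k fully processed, block k processed at positions < q
def pvMix (s : List Char) (sb : List String) (k q : Nat) : List (Int × Int) :=
  (List.range s.length).filterMap (pvMixF s sb k q)

def pvCanon (s : List Char) (sb : List String) (k : Nat) : List (Int × Int) :=
  (List.range s.length).filterMap (fun p => (pvBest s sb k p).map (fun b => ((p : Int), b)))

-- A's guarded per-position step: block k acts at position p only if it matches there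
def pvGStep (s : List Char) (sb : List String) (k : Nat) (abp : List (Int × Int)) (p : Nat) : List (Int × Int) :=
  if PySem.Chars.startswith (s.drop p) (PySem.List.pyGetD sb (k : Int) "").toList
  then pvAInner sb (k : Int) abp (p : Int) else abp

theorem pvMix_zero (s : List Char) (sb : List String) (k : Nat) :
    pvMix s sb k 0 = pvCanon s sb k := by
  unfold pvMix pvCanon
  exact List.filterMap_congr (fun p _ => by simp [pvMixF])

theorem pvMix_len (s : List Char) (sb : List String) (k : Nat) :
    pvMix s sb k s.length = pvCanon s sb (k+1) := by
  unfold pvMix pvCanon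
  exact List.filterMap_congr (fun p hp => by simp [pvMixF, List.mem_range.mp hp])

theorem pvBest_succ (s : List Char) (sb : List String) (k p : Nat) :
    pvBest s sb (k+1) p = pvStep s sb p (pvBest s sb k p) (k : Int) := by
  unfold pvBest
  rw [List.range_succ, List.foldl_append]
  rfl

theorem filterMap_range_split {α : Type} (f : Nat → Option α) (n q : Nat) (hq : q < n) :
    (List.range n).filterMap f
      = (List.range q).filterMap f ++ (f q).toList
        ++ (List.range' (q+1) (n - (q+1))).filterMap f := by
  have h1 : List.range n = List.range q ++ List.range' q (n - q) := by
    rw [List.range_eq_range', List.range_eq_range']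
    have := @List.range'_append 0 q (n - q) 1
    simp only [Nat.one_mul, Nat.zero_add] at this
    rw [Nat.add_sub_cancel' (Nat.le_of_lt hq)] at this
    rw [← this]
  have h2 : n - q = (n - (q+1)) + 1 := by omega
  rw [h1, h2, List.range'_succ, List.filterMap_append, List.filterMap_cons]
  cases hfq : f q
  · simp
  · simp

theorem pvEraseIdx_append {α : Type} (pre suf : List α) (v : α) :
    (pre ++ v :: suf).eraseIdx pre.length = pre ++ suf := by
  induction pre with
  | nil => simp
  | cons a t ih => simp [List.eraseIdx_cons_succ, ih]

theorem pop_at_index {α : Type} [BEq α] [LawfulBEq α] (l : List α) (v : α) (j : Nat)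
    (h : PySem.List.index? l v = some j) :
    PySem.List.pop? l (j : Int) = some (v, l.erase v) := by
  obtain ⟨pre, suf, rfl, hlen, hnot⟩ := (PySem.List.index?_eq_some_iff _ _ _).mp h
  subst hlen
  have hj : pre.length < (pre ++ v :: suf).length := by
    simp [List.length_append]
  rw [PySem.List.pop?_natCast _ _ hj]
  have hget : (pre ++ v :: suf)[pre.length] = v := by simp
  have herase2 : (pre ++ v :: suf).erase v = pre ++ suf := by
    rw [List.erase_append_right _ hnot, List.erase_cons_head]
  rw [hget, pvEraseIdx_append, herase2]

-- every element produced from position p carries first component ↑p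
theorem pvMixF_fst (s : List Char) (sb : List String) (k q : Nat) (l : List Nat) (x : Int × Int)
    (hx : x ∈ l.filterMap (pvMixF s sb k q)) : ∃ p ∈ l, x.1 = (p : Int) := by
  rw [List.mem_filterMap] at hx
  obtain ⟨p, hp, hpx⟩ := hx
  unfold pvMixF at hpx
  rcases Option.map_eq_some_iff.mp hpx with ⟨b, _, rfl⟩
  exact ⟨p, hp, rfl⟩

theorem pvMixF_congr_lt (s : List Char) (sb : List String) (k q : Nat) (p : Nat) (hp : p < q) :
    pvMixF s sb k (q+1) p = pvMixF s sb k q p := by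
  simp [pvMixF, hp, Nat.lt_succ_of_lt hp]

theorem pvMixF_congr_gt (s : List Char) (sb : List String) (k q : Nat) (p : Nat) (hp : q < p) :
    pvMixF s sb k (q+1) p = pvMixF s sb k q p := by
  have h1 : ¬ p < q := by omega
  have h2 : ¬ p < q + 1 := by omega
  simp [pvMixF, h1, h2]

theorem pvMix_split (s : List Char) (sb : List String) (k q : Nat) (hq : q < s.length) :
    pvMix s sb k q
      = (List.range q).filterMap (pvMixF s sb k q)
        ++ ((pvBest s sb k q).map (fun b => ((q : Int), b))).toList
        ++ (List.range' (q+1) (s.length - (q+1))).filterMap (pvMixF s sb k q) := by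
  unfold pvMix
  rw [filterMap_range_split _ _ _ hq]
  have : pvMixF s sb k q q = (pvBest s sb k q).map (fun b => ((q : Int), b)) := by
    simp [pvMixF]
  rw [this]

theorem pvMix_succ_split (s : List Char) (sb : List String) (k q : Nat) (hq : q < s.length) :
    pvMix s sb k (q+1)
      = (List.range q).filterMap (pvMixF s sb k q)
        ++ ((pvStep s sb q (pvBest s sb k q) (k : Int)).map (fun b => ((q : Int), b))).toList
        ++ (List.range' (q+1) (s.length - (q+1))).filterMap (pvMixF s sb k q) := by
  unfold pvMix
  rw [filterMap_range_split _ _ _ hq]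
  have hmid : pvMixF s sb k (q+1) q = (pvStep s sb q (pvBest s sb k q) (k : Int)).map (fun b => ((q : Int), b)) := by
    simp only [pvMixF, Nat.lt_succ_self, if_pos, pvBest_succ]
  rw [hmid,
    List.filterMap_congr (fun p hp => pvMixF_congr_lt s sb k q p (List.mem_range.mp hp)),
    List.filterMap_congr (fun p hp => pvMixF_congr_gt s sb k q p (by
      have := (List.mem_range'_1.mp hp).1; omega))]

-- case-split form of the best-update step
theorem pvStep_eq (s : List Char) (sb : List String) (p : Nat) (best : Option Int) (i : Int) :
    pvStep s sb p best i =
      if PySem.Chars.startswith (s.drop p) (PySem.List.pyGetD sb i "").toList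
          && (best.elim true (fun b => decide (PySem.Str.len (PySem.List.pyGetD sb b "")
              < PySem.Str.len (PySem.List.pyGetD sb i ""))))
      then some i else best := by
  cases best <;> rfl

-- appending the new pair permutes into its place in the split model
theorem pvAppend_perm {α : Type} (abp X Y : List α) (e : α) (h : abp.Perm (X ++ Y)) :
    (abp ++ [e]).Perm (X ++ [e] ++ Y) := by
  refine (h.append_right [e]).trans ?_
  rw [List.append_assoc, List.append_assoc, List.singleton_append]
  exact List.Perm.append_left X (List.perm_append_singleton e Y)

-- the key step: one guarded position step of A preserves the model
theorem pvGStep_perm (s : List Char) (sb : List String) (k q : Nat) (hq : q < s.length)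
    (abp : List (Int × Int)) (h : abp.Perm (pvMix s sb k q)) :
    (pvGStep s sb k abp q).Perm (pvMix s sb k (q+1)) := by
  by_cases hgood : PySem.Chars.startswith (s.drop q) (PySem.List.pyGetD sb (k : Int) "").toList = true
  case neg =>
    have hgood' : PySem.Chars.startswith (s.drop q) (PySem.List.pyGetD sb (k : Int) "").toList = false :=
      Bool.eq_false_iff.mpr hgood
    have hkeep : pvStep s sb q (pvBest s sb k q) (k : Int) = pvBest s sb k q := by
      rw [pvStep_eq, hgood', Bool.false_and, if_neg (by simp)]
    have hsame : pvMix s sb k (q+1) = pvMix s sb k q := by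
      rw [pvMix_succ_split s sb k q hq, pvMix_split s sb k q hq, hkeep]
    rw [hsame]
    unfold pvGStep
    rw [hgood', if_neg (by simp)]
    exact h
  case pos =>
    have hXq : ∀ x ∈ (List.range q).filterMap (pvMixF s sb k q), x.1 ≠ (q : Int) := by
      intro x hx
      obtain ⟨p, hp, hfst⟩ := pvMixF_fst s sb k q _ x hx
      have hpq : p < q := List.mem_range.mp hp
      rw [hfst]
      exact_mod_cast Nat.ne_of_lt hpq
    have hYq : ∀ x ∈ (List.range' (q+1) (s.length - (q+1))).filterMap (pvMixF s sb k q), x.1 ≠ (q : Int) := by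
      intro x hx
      obtain ⟨p, hp, hfst⟩ := pvMixF_fst s sb k q _ x hx
      have hpq : q < p := by have := (List.mem_range'_1.mp hp).1; omega
      rw [hfst]
      exact_mod_cast (Nat.ne_of_lt hpq).symm
    have hfilter : (abp.filter (fun t => t.1 == (q : Int))).Perm
        ((pvMix s sb k q).filter (fun t => t.1 == (q : Int))) := h.filter _
    rw [pvMix_split s sb k q hq, List.filter_append, List.filter_append] at hfilter
    have hX0 : List.filter (fun t => t.1 == (q : Int)) ((List.range q).filterMap (pvMixF s sb k q)) = [] :=
      List.filter_eq_nil_iff.mpr (fun x hx => by simp [hXq x hx])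
    have hY0 : List.filter (fun t => t.1 == (q : Int))
        ((List.range' (q+1) (s.length - (q+1))).filterMap (pvMixF s sb k q)) = [] :=
      List.filter_eq_nil_iff.mpr (fun x hx => by simp [hYq x hx])
    rw [hX0, hY0, List.nil_append, List.append_nil] at hfilter
    unfold pvGStep
    rw [hgood, if_pos rfl]
    cases hbq : pvBest s sb k q with
    | none =>
      rw [hbq] at hfilter
      simp only [Option.map_none, Option.toList_none, List.filter_nil] at hfilter
      have hvar : abp.filter (fun t => t.1 == (q : Int)) = [] := List.perm_nil.mp hfilter
      have hnew : pvStep s sb q (pvBest s sb k q) (k : Int) = some (k : Int) := by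
        rw [pvStep_eq, hbq, Option.elim_none, Bool.and_true, hgood, if_pos rfl]
      have habp : abp.Perm ((List.range q).filterMap (pvMixF s sb k q)
          ++ (List.range' (q+1) (s.length - (q+1))).filterMap (pvMixF s sb k q)) := by
        have hs := pvMix_split s sb k q hq
        rw [hbq] at hs
        simp only [Option.map_none, Option.toList_none, List.append_nil] at hs
        rw [hs] at h
        simpa using h
      rw [pvMix_succ_split s sb k q hq, hnew]
      unfold pvAInner
      rw [hvar]
      simp only [Option.map_some, Option.toList_some]
      exact pvAppend_perm abp _ _ _ habp
    | some b =>
      rw [hbq] at hfilter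
      simp only [Option.map_some, Option.toList_some, List.filter_cons, List.filter_nil,
        beq_self_eq_true, if_pos] at hfilter
      have hvar : abp.filter (fun t => t.1 == (q : Int)) = [((q : Int), b)] := by
        apply List.perm_singleton.mp
        simpa using hfilter
      by_cases hlt : PySem.Str.len (PySem.List.pyGetD sb b "") < PySem.Str.len (PySem.List.pyGetD sb (k : Int) "")
      case neg =>
        have hkeep : pvStep s sb q (pvBest s sb k q) (k : Int) = some b := by
          rw [pvStep_eq, hbq, Option.elim_some, hgood, Bool.true_and, decide_eq_false hlt,
            if_neg (by simp)]
        have hsame : pvMix s sb k (q+1) = pvMix s sb k q := by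
          rw [pvMix_succ_split s sb k q hq, pvMix_split s sb k q hq, hkeep, hbq]
        rw [hsame]
        unfold pvAInner
        rw [hvar]
        simp only [if_neg hlt]
        exact h
      case pos =>
        have hnew : pvStep s sb q (pvBest s sb k q) (k : Int) = some (k : Int) := by
          rw [pvStep_eq, hbq, Option.elim_some, hgood, Bool.true_and, decide_eq_true hlt,
            if_pos rfl]
        have hmem : ((q : Int), b) ∈ abp :=
          List.mem_of_mem_filter (hvar ▸ List.mem_singleton_self _)
        obtain ⟨j, hj⟩ := Option.isSome_iff_exists.mp ((PySem.List.index?_isSome_iff abp _).mpr hmem)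
        unfold pvAInner
        rw [hvar]
        simp only [if_pos hlt, hj, pop_at_index abp _ j hj]
        have herase : (abp.erase ((q : Int), b)).Perm ((pvMix s sb k q).erase ((q : Int), b)) :=
          h.erase _
        rw [pvMix_split s sb k q hq, hbq] at herase
        simp only [Option.map_some, Option.toList_some] at herase
        rw [List.append_assoc, List.erase_append_right _ (fun hc => hXq _ hc rfl),
          List.singleton_append, List.erase_cons_head] at herase
        rw [pvMix_succ_split s sb k q hq, hnew]
        simp only [Option.map_some, Option.toList_some]
        exact pvAppend_perm _ _ _ _ herase

-- folding A's guarded step over a contiguous run of positions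
theorem pvInner_fold (s : List Char) (sb : List String) (k : Nat) :
    ∀ (c q : Nat), q + c ≤ s.length → ∀ abp : List (Int × Int), abp.Perm (pvMix s sb k q) →
      ((List.range' q c).foldl (pvGStep s sb k) abp).Perm (pvMix s sb k (q + c)) := by
  intro c
  induction c with
  | zero => intro q _ abp h; simpa using h
  | succ c ih =>
      intro q hqc abp h
      rw [List.range'_succ, List.foldl_cons]
      have h1 := pvGStep_perm s sb k q (by omega) abp h
      have h2 := ih (q+1) (by omega) _ h1
      have : q + (c + 1) = (q + 1) + c := by omega
      rw [this]
      exact h2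

-- processing one whole block of A
theorem pvBlock_perm (s : List Char) (sb : List String) (k : Nat) (abp : List (Int × Int))
    (h : abp.Perm (pvCanon s sb k)) :
    ((List.range s.length).foldl (pvGStep s sb k) abp).Perm (pvCanon s sb (k+1)) := by
  rw [List.range_eq_range']
  have := pvInner_fold s sb k s.length 0 (by omega) abp (by rw [pvMix_zero]; exact h)
  rw [Nat.zero_add, pvMix_len] at this
  exact this

theorem pvOuter_perm (s : List Char) (sb : List String) :
    ∀ n : Nat,
      ((List.range n).foldl (fun abp k => (List.range s.length).foldl (pvGStep s sb k) abp) []).Perm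
        (pvCanon s sb n) := by
  intro n
  induction n with
  | zero =>
      simp [pvCanon, pvBest]
  | succ n ih =>
      rw [List.range_succ, List.foldl_append, List.foldl_cons, List.foldl_nil]
      exact pvBlock_perm s sb n _ ih

theorem pvCanon_pairwise (s : List Char) (sb : List String) (n : Nat) :
    (pvCanon s sb n).Pairwise (fun a b => a.1 < b.1) := by
  unfold pvCanon
  rw [List.pairwise_filterMap]
  refine List.pairwise_lt_range.imp ?_
  intro a b hab x hx y hy
  rcases Option.map_eq_some_iff.mp hx with ⟨u, _, rfl⟩
  rcases Option.map_eq_some_iff.mp hy with ⟨w, _, rfl⟩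
  show (a : Int) < (b : Int)
  exact_mod_cast hab

-- A's inner block loop is the guarded per-position fold
theorem pvA_inner_eq (string : String) (sb : List String) (k : Nat) (abp : List (Int × Int)) :
    ((PySem.List.pyRange 0 (PySem.Str.len string)).filter
        (fun char => PySem.Chars.startswith (string.toList.drop char.toNat)
          (PySem.List.pyGetD sb ((k : Nat) : Int) "").toList)).foldl (pvAInner sb ((k : Nat) : Int)) abp
      = (List.range string.toList.length).foldl (pvGStep string.toList sb k) abp := by
  rw [← PySem.List.foldl_if_eq_foldl_filter]
  rw [PySem.Str.len_eq, PySem.List.pyRange_zero_nat, List.foldl_map]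
  apply List.foldl_ext
  intro acc p _
  simp [pvGStep]

theorem pvA_eq_canon (string : String) (matching_blocks string_blocks : List String) :
    get_ordered_blocks_positions string matching_blocks string_blocks
      = pvCanon string.toList string_blocks matching_blocks.length := by
  unfold get_ordered_blocks_positions
  rw [PySem.List.enumerate_eq_map_pyRange matching_blocks "", List.foldl_map,
    PySem.List.len_eq, PySem.List.pyRange_zero_nat, List.foldl_map]
  have hbody : (fun (abp : List (Int × Int)) (j : Nat) =>
        ((PySem.List.pyRange 0 (PySem.Str.len string)).filter
          (fun char => PySem.Chars.startswith (string.toList.drop char.toNat)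
            (PySem.List.pyGetD string_blocks (((j : Nat) : Int), PySem.List.pyGetD matching_blocks ((j : Nat) : Int) "").1 "").toList)).foldl
          (pvAInner string_blocks (((j : Nat) : Int), PySem.List.pyGetD matching_blocks ((j : Nat) : Int) "").1) abp)
      = (fun abp j => (List.range string.toList.length).foldl (pvGStep string.toList string_blocks j) abp) := by
    funext abp j
    exact pvA_inner_eq string string_blocks j abp
  rw [hbody]
  exact PySem.List.sorted_eq_of_perm_of_pairwise_lt _ _ _
    (pvOuter_perm string.toList string_blocks matching_blocks.length).symm
    (pvCanon_pairwise string.toList string_blocks matching_blocks.length)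

-- appending-on-match loop shape of B's outer pass
theorem pvFoldl_match_append {β : Type} (l : List β) (g : β → Option Int) (h : β → Int → Int × Int)
    (acc : List (Int × Int)) :
    l.foldl (fun res x => match g x with | some b => res ++ [h x b] | none => res) acc
      = acc ++ l.filterMap (fun x => (g x).map (h x)) := by
  induction l generalizing acc with
  | nil => simp
  | cons a t ih =>
      rw [List.foldl_cons, List.filterMap_cons, ih]
      cases hga : g a <;> simp

theorem pvB_eq_canon (string : String) (matching_blocks string_blocks : List String) :
    get_ordered_blocks_positions_alt string matching_blocks string_blocks
      = pvCanon string.toList string_blocks matching_blocks.length := by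
  unfold get_ordered_blocks_positions_alt
  rw [PySem.Str.len_eq, PySem.List.pyRange_zero_nat, List.foldl_map]
  have hbody : (fun (result : List (Int × Int)) (p : Nat) =>
        match (PySem.List.pyRange 0 (PySem.List.len matching_blocks)).foldl
            (fun best i =>
              if PySem.Chars.startswith (string.toList.drop (((p : Nat) : Int)).toNat)
                    (PySem.List.pyGetD string_blocks i "").toList
                  && (match best with
                      | none => true
                      | some b => decide (PySem.Str.len (PySem.List.pyGetD string_blocks b "")
                          < PySem.Str.len (PySem.List.pyGetD string_blocks i "")))
              then some i else best)
            (none : Option Int) with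
        | some b => result ++ [(((p : Nat) : Int), b)]
        | none => result)
      = (fun result p =>
          match pvBest string.toList string_blocks matching_blocks.length p with
          | some b => result ++ [(((p : Nat) : Int), b)]
          | none => result) := by
    funext result p
    have hinner : (PySem.List.pyRange 0 (PySem.List.len matching_blocks)).foldl
          (fun best i =>
            if PySem.Chars.startswith (string.toList.drop (((p : Nat) : Int)).toNat)
                  (PySem.List.pyGetD string_blocks i "").toList
                && (match best with
                    | none => true
                    | some b => decide (PySem.Str.len (PySem.List.pyGetD string_blocks b "")
                        < PySem.Str.len (PySem.List.pyGetD string_blocks i "")))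
            then some i else best)
          (none : Option Int)
        = pvBest string.toList string_blocks matching_blocks.length p := by
      rw [PySem.List.len_eq, PySem.List.pyRange_zero_nat, List.foldl_map]
      unfold pvBest
      apply List.foldl_ext
      intro best i _
      simp [pvStep]
    rw [hinner]
  rw [hbody]
  have := pvFoldl_match_append (List.range string.toList.length)
    (fun p => pvBest string.toList string_blocks matching_blocks.length p)
    (fun p b => (((p : Nat) : Int), b)) []
  rw [this]
  simp [pvCanon]

-- ===== VERDICT (by name: the statement is the Claim_ definition above) =====
theorem get_ordered_blocks_positions_spec : Claim_equal_get_ordered_blocks_positions := by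
  intro string matching_blocks string_blocks _ _
  unfold Spec_get_ordered_blocks_positions
  rw [pvA_eq_canon, pvB_eq_canon]
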